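-- pv_equiv track=rewrite | github.com/SvartKaffe/PCR-primers | primer_algorithms.py | trie_primers
-- ===== SOURCE A (Python) =====
-- def trie_primers(sequence, length: int, reverse=False) -> dict:
--     """
--     This function divides the genome into primers of size length.
--     :param sequence: Sequence object
--     :param length: length of the primers
--     :param reverse: used to generate the correct start/stop positions if the reverse complement is used.
--     :return: dictionary containing primers of size length
--     """
--     i = 0
--     primers = {}
--     duplicate_primers = []
--     while i <= len(sequence):
--         primer = sequence[i:i+length]
--         primer_conditions = (
--                 len(primer) == length
--         )
--         primer_length = len(primer)
--         if reverse:
--             start = len(sequence) - i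
--             stop = start + 1 - primer_length
--         else:
--             start = i+1
--             stop = i+primer_length
--
--         if primer_conditions:
--             if (primer in primers.keys()) and (primer not in duplicate_primers):
--                 duplicate_primers.append(primer)
--             if (primer not in primers.keys()) and (primer not in duplicate_primers):
--                 primers[primer] = {"length": primer_length,
--                                    "start": start,
--                                    "stop": stop,
--                                    }
--         i += 1
--     # Removes any primers found multiple times in the sequence
--     for i in duplicate_primers:
--         if i in primers.keys():
--             primers.pop(i)
--
--     return primers
-- ===== SOURCE B (Python) =====
-- def trie_primers(sequence, length: int, reverse=False) -> dict:
--     """Sort-based rewrite: collect all full-length windows, find the duplicated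
--     primers by sorting and scanning for equal neighbours, then keep the unique ones."""
--     n = len(sequence)
--     windows = []
--     for i in range(n + 1):
--         w = sequence[i:i+length]
--         if len(w) == length:
--             windows.append((i, w))
--     ordered = sorted(w for _, w in windows)
--     duplicated = {ordered[j] for j in range(1, len(ordered)) if ordered[j - 1] == ordered[j]}
--     result = {}
--     for i, w in windows:
--         if w not in duplicated:
--             if reverse:
--                 start = n - i
--                 stop = start + 1 - length
--             else:
--                 start = i + 1
--                 stop = i + length
--             result[w] = {"length": length, "start": start, "stop": stop}
--     return result
-- ===== Notes on version B (the rewrite author's own statement) =====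
-- stated objective: alternative
-- what changed: Replaces A's incremental dict+duplicate-list bookkeeping with pop-cleanup by a staged sort-based algorithm: collect all full-length windows, sort the primers and detect duplicates as equal sorted neighbours, then build the result from the non-duplicated windows.
import Mathlib
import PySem

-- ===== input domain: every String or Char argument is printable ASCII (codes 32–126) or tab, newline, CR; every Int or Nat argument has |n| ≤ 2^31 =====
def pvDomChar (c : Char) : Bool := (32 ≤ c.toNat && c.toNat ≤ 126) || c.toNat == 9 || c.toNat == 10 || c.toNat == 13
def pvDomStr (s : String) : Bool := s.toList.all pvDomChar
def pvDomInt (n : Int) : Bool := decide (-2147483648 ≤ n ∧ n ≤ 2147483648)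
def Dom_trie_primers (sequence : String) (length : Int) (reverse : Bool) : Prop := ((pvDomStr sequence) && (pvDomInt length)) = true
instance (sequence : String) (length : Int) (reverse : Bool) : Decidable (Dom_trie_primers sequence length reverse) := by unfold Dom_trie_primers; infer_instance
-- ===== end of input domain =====

-- B replaces A's incremental dict/duplicate-list bookkeeping by a sort-based
-- duplicate scan: collect the windows, sort them, mark primers with equal
-- sorted neighbours as duplicated, and keep the rest (alternative algorithm).


-- ===== PORT A =====
-- loop body of A's while-loop: state = (primers, duplicate_primers)
def trieStepA (sequence : String) (length : Int) (reverse : Bool)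
    (st : PySem.Dict String (List (String × Int)) × List String) (i : Int) :
    PySem.Dict String (List (String × Int)) × List String :=
  let primers := st.1
  let dups := st.2
  let primer := PySem.Str.slice sequence (some i) (some (i + length))
  let primer_length : Int := PySem.Str.len primer
  let primer_conditions := primer_length == length
  let n : Int := PySem.Str.len sequence
  let start : Int := if reverse then n - i else i + 1
  let stop : Int := if reverse then start + 1 - primer_length else i + primer_length
  if primer_conditions then
    let dups' := if primers.contains primer && !(dups.contains primer) then dups ++ [primer] else dups
    if !(primers.contains primer) && !(dups'.contains primer) then
      (primers.insert primer [("length", primer_length), ("start", start), ("stop", stop)], dups')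
    else (primers, dups')
  else (primers, dups)

def trie_primers (sequence : String) (length : Int) (reverse : Bool) : List (String × List (String × Int)) :=
  let n : Int := PySem.Str.len sequence
  let st := (PySem.List.pyRange 0 (n + 1) 1).foldl (trieStepA sequence length reverse) (PySem.Dict.empty, [])
  -- "for i in duplicate_primers: if i in primers.keys(): primers.pop(i)"
  (st.2.foldl (fun d k => if d.contains k then d.erase k else d) st.1).items

-- ===== PORT B =====
def trie_primers_alt (sequence : String) (length : Int) (reverse : Bool) : List (String × List (String × Int)) :=
  let n : Int := PySem.Str.len sequence
  -- windows = [(i, w)] for full-length slices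
  let windows := (PySem.List.pyRange 0 (n + 1) 1).foldl
    (fun acc i =>
      let w := PySem.Str.slice sequence (some i) (some (i + length))
      if PySem.Str.len w == length then acc ++ [(i, w)] else acc) []
  -- ordered = sorted(w for _, w in windows)
  let ordered := PySem.List.sorted (windows.map Prod.snd) (fun x => x) false
  -- duplicated = {ordered[j] for j in range(1, len(ordered)) if ordered[j-1] == ordered[j]}
  let duplicated : PySem.Set String := PySem.Set.ofList
    ((PySem.List.pyRange 1 (Int.ofNat ordered.length) 1).filterMap (fun j =>
      match PySem.List.pyGet? ordered (j - 1), PySem.List.pyGet? ordered j with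
      | some a, some b => if a == b then some b else none
      | _, _ => none))
  -- result: keep the windows whose primer is not duplicated
  let result := windows.foldl (fun d p =>
      if duplicated.contains p.2 then d
      else
        let start : Int := if reverse then n - p.1 else p.1 + 1
        let stop : Int := if reverse then start + 1 - length else p.1 + length
        d.insert p.2 [("length", length), ("start", start), ("stop", stop)]) PySem.Dict.empty
  result.items

-- ===== PRECONDITION & SPEC =====
def Spec_trie_primers (sequence : String) (length : Int) (reverse : Bool) (out : List (String × List (String × Int))) : Prop := out = trie_primers_alt sequence length reverse
instance (sequence : String) (length : Int) (reverse : Bool) (out : List (String × List (String × Int))) : Decidable (Spec_trie_primers sequence length reverse out) := by unfold Spec_trie_primers; infer_instance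

-- ===== CLAIM (what is proved, stated in full; the proofs are below) =====
def Claim_equal_trie_primers : Prop := ∀ (sequence : String) (length : Int) (reverse : Bool), Dom_trie_primers sequence length reverse → Spec_trie_primers sequence length reverse (trie_primers sequence length reverse)

-- ===== LEMMAS AND PROOFS =====

-- the metadata dict stored for a window starting at i (under the full-length condition)
def pvMeta (n length : Int) (reverse : Bool) (i : Int) : List (String × Int) :=
  let start : Int := if reverse then n - i else i + 1
  let stop : Int := if reverse then start + 1 - length else i + length
  [("length", length), ("start", start), ("stop", stop)]

-- A's loop body specialized to a full-length window (i, w)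
def stepA' (n length : Int) (reverse : Bool)
    (st : PySem.Dict String (List (String × Int)) × List String) (p : Int × String) :
    PySem.Dict String (List (String × Int)) × List String :=
  let dups' := if st.1.contains p.2 && !(st.2.contains p.2) then st.2 ++ [p.2] else st.2
  if !(st.1.contains p.2) && !(dups'.contains p.2) then
    (st.1.insert p.2 (pvMeta n length reverse p.1), dups')
  else (st.1, dups')

-- B's loop body (q = membership in the duplicated set)
def stepB' (n length : Int) (reverse : Bool) (q : String → Bool)
    (d : PySem.Dict String (List (String × Int))) (p : Int × String) :
    PySem.Dict String (List (String × Int)) :=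
  if q p.2 then d else d.insert p.2 (pvMeta n length reverse p.1)

-- first-occurrence items list of a window list
def fstM (n length : Int) (reverse : Bool) (l : List (Int × String)) :
    List (String × List (String × Int)) :=
  l.foldl (fun acc x => if acc.any (fun p => p.1 == x.2) then acc
                        else acc ++ [(x.2, pvMeta n length reverse x.1)]) []

-- generic: a fold over the index range equals a fold over the windows list
lemma fold_over_windows {σ : Type} (g : σ → Int → σ) (h : σ → Int × String → σ)
    (c : Int → Bool) (f : Int → String)
    (hg : ∀ st i, g st i = if c i then h st (i, f i) else st) :
    ∀ (l : List Int) (st : σ),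
      l.foldl g st = ((l.filter c).map (fun i => (i, f i))).foldl h st := by
  intro l
  induction l with
  | nil => intro st; rfl
  | cons i rest ih =>
    intro st
    by_cases hc : c i = true
    · rw [List.foldl_cons, List.filter_cons_of_pos hc, List.map_cons, List.foldl_cons, hg, if_pos hc, ih]
    · rw [List.foldl_cons, List.filter_cons_of_neg (by simpa using hc), hg,
        if_neg (by simpa using hc), ih]

-- A's fold is stepA' over the windows
lemma A_step_eq (sequence : String) (length : Int) (reverse : Bool) (st : _) (i : Int) :
    trieStepA sequence length reverse st i =
      (if (PySem.Str.len (PySem.Str.slice sequence (some i) (some (i + length))) == length) = true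
       then stepA' (PySem.Str.len sequence) length reverse st
              (i, PySem.Str.slice sequence (some i) (some (i + length)))
       else st) := by
  by_cases hc : (PySem.Str.len (PySem.Str.slice sequence (some i) (some (i + length))) == length) = true
  · have hlen : PySem.Str.len (PySem.Str.slice sequence (some i) (some (i + length))) = length := by
      exact_mod_cast eq_of_beq hc
    rw [if_pos hc]
    simp only [trieStepA, stepA', pvMeta, hlen]
    simp
  · rw [if_neg hc]
    simp only [trieStepA, hc, Bool.false_eq_true, if_false]

-- keys of fstM are the distinct primers seen, in order
lemma fstM_keys (n length : Int) (reverse : Bool) :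
    ∀ l : List (Int × String),
      (fstM n length reverse l).map Prod.fst = PySem.Set.ofList (l.map Prod.snd) := by
  intro l
  induction l using List.reverseRecOn with
  | nil => rfl
  | append_singleton l x ih =>
    have hstep : fstM n length reverse (l ++ [x]) =
        (if (fstM n length reverse l).any (fun p => p.1 == x.2) then fstM n length reverse l
         else fstM n length reverse l ++ [(x.2, pvMeta n length reverse x.1)]) := by
      simp only [fstM, List.foldl_append, List.foldl_cons, List.foldl_nil]
    rw [hstep, List.map_append, List.map_cons, List.map_nil,
      PySem.Set.ofList_append_singleton]
    by_cases hm : x.2 ∈ l.map Prod.snd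
    · have hx : x.2 ∈ (fstM n length reverse l).map Prod.fst := by
        rw [ih]; exact (PySem.Set.mem_ofList _ _).2 hm
      obtain ⟨p, hp, hfst⟩ := List.mem_map.1 hx
      rw [if_pos (List.any_eq_true.2 ⟨p, hp, by simp [hfst]⟩), ih,
        PySem.Set.add_of_mem ((PySem.Set.mem_ofList _ _).2 hm)]
    · have hany : (fstM n length reverse l).any (fun p => p.1 == x.2) = false := by
        rw [Bool.eq_false_iff]
        intro hany
        obtain ⟨p, hp, hfst⟩ := List.any_eq_true.1 hany
        exact hm (by
          have : p.1 ∈ (fstM n length reverse l).map Prod.fst := List.mem_map_of_mem hp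
          rw [ih] at this
          exact (beq_iff_eq.1 hfst) ▸ (PySem.Set.mem_ofList _ _).1 this)
      rw [if_neg (by rw [hany]; simp), List.map_append, List.map_cons,
        List.map_nil, ih, PySem.Set.add_of_not_mem (fun h => hm ((PySem.Set.mem_ofList _ _).1 h))]

-- characterisation of A's fold state
lemma A_char (n length : Int) (reverse : Bool) :
    ∀ l : List (Int × String),
      (l.foldl (stepA' n length reverse) (PySem.Dict.empty, [])).1.items = fstM n length reverse l ∧
      (l.foldl (stepA' n length reverse) (PySem.Dict.empty, [])).1.keys.Nodup ∧
      (∀ w : String, w ∈ (l.foldl (stepA' n length reverse) (PySem.Dict.empty, [])).2 ↔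
        2 ≤ (l.map Prod.snd).count w) := by
  intro l
  induction l using List.reverseRecOn with
  | nil =>
    refine ⟨rfl, by simp [PySem.Dict.empty, PySem.Dict.keys], ?_⟩
    simp
  | append_singleton l x ih =>
    obtain ⟨hitems, hnd, hdups⟩ := ih
    set st := l.foldl (stepA' n length reverse) (PySem.Dict.empty, []) with hst
    have hfold : (l ++ [x]).foldl (stepA' n length reverse) (PySem.Dict.empty, []) =
        stepA' n length reverse st x := by
      rw [List.foldl_append, List.foldl_cons, List.foldl_nil]
    have hkeys : st.1.keys = (fstM n length reverse l).map Prod.fst := by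
      show st.1.items.map Prod.fst = _
      rw [hitems]
    have hcontains : st.1.contains x.2 = decide (x.2 ∈ l.map Prod.snd) := by
      by_cases hm : x.2 ∈ l.map Prod.snd
      · rw [(PySem.Dict.contains_iff_mem_keys _ _).2
          (by rw [hkeys, fstM_keys]; exact (PySem.Set.mem_ofList _ _).2 hm), decide_eq_true hm]
      · rw [decide_eq_false hm]
        rw [Bool.eq_false_iff]
        intro hc
        have := (PySem.Dict.contains_iff_mem_keys _ _).1 hc
        rw [hkeys, fstM_keys] at this
        exact hm ((PySem.Set.mem_ofList _ _).1 this)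
    have hstepM : fstM n length reverse (l ++ [x]) =
        (if (fstM n length reverse l).any (fun p => p.1 == x.2) then fstM n length reverse l
         else fstM n length reverse l ++ [(x.2, pvMeta n length reverse x.1)]) := by
      simp only [fstM, List.foldl_append, List.foldl_cons, List.foldl_nil]
    have hcount : ∀ w : String, ((l ++ [x]).map Prod.snd).count w =
        (l.map Prod.snd).count w + (if w = x.2 then 1 else 0) := by
      intro w
      rw [List.map_append, List.count_append]
      by_cases hw : w = x.2
      · subst hw; simp
      · simp [Ne.symm hw, hw]
    by_cases hm : x.2 ∈ l.map Prod.snd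
    · -- seen primer: no insertion
      have hany : (fstM n length reverse l).any (fun p => p.1 == x.2) = true := by
        have hx : x.2 ∈ (fstM n length reverse l).map Prod.fst := by
          rw [fstM_keys]; exact (PySem.Set.mem_ofList _ _).2 hm
        obtain ⟨p, hp, hfst⟩ := List.mem_map.1 hx
        exact List.any_eq_true.2 ⟨p, hp, by simp [hfst]⟩
      have hcx : 1 ≤ (l.map Prod.snd).count x.2 := List.one_le_count_iff.2 hm
      have hcont : st.1.contains x.2 = true := by rw [hcontains, decide_eq_true hm]
      by_cases hd : x.2 ∈ st.2
      · -- already a known duplicate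
        have hdc : st.2.contains x.2 = true := by simpa using hd
        have hstep : stepA' n length reverse st x = (st.1, st.2) := by
          simp only [stepA', hcont, hdc, Bool.not_true, Bool.and_false,
            Bool.false_eq_true, if_false]
        rw [hfold, hstep, hstepM, if_pos hany]
        refine ⟨hitems, hnd, ?_⟩
        intro w
        rw [hcount]
        by_cases hw : w = x.2
        · subst hw
          have h2 := (hdups _).1 hd
          rw [if_pos rfl]
          exact ⟨fun _ => by omega, fun _ => hd⟩
        · simp only [if_neg hw, Nat.add_zero]
          exact hdups w
      · -- second sighting: x.2 is appended to the duplicate list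
        have hdc : st.2.contains x.2 = false := by simpa using hd
        have hstep : stepA' n length reverse st x = (st.1, st.2 ++ [x.2]) := by
          simp only [stepA', hcont, hdc, Bool.not_false, Bool.and_true,
            if_true, List.contains_append, Bool.not_true, Bool.false_and]
          simp
        rw [hfold, hstep, hstepM, if_pos hany]
        refine ⟨hitems, hnd, ?_⟩
        intro w
        rw [hcount]
        have hc1 : (l.map Prod.snd).count x.2 = 1 := by
          have h2 := hdups x.2
          rcases Nat.lt_or_ge ((l.map Prod.snd).count x.2) 2 with h | h
          · omega
          · exact absurd (h2.2 h) hd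
        by_cases hw : w = x.2
        · subst hw
          rw [if_pos rfl]
          simp only [List.mem_append, List.mem_singleton]
          exact ⟨fun _ => by omega, fun _ => by simp⟩
        · simp only [if_neg hw, Nat.add_zero, List.mem_append, List.mem_singleton]
          constructor
          · rintro (h | rfl)
            · exact (hdups w).1 h
            · exact absurd rfl hw
          · intro h; exact Or.inl ((hdups w).2 h)
    · -- fresh primer: inserted
      have hcont : st.1.contains x.2 = false := by rw [hcontains, decide_eq_false hm]
      have hd : x.2 ∉ st.2 := by
        intro hmem
        have := (hdups _).1 hmem
        have : 1 ≤ (l.map Prod.snd).count x.2 := by omega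
        exact hm (List.one_le_count_iff.1 this)
      have hdc : st.2.contains x.2 = false := by simpa using hd
      have hany : (fstM n length reverse l).any (fun p => p.1 == x.2) = false := by
        rw [Bool.eq_false_iff]
        intro hany
        obtain ⟨p, hp, hfst⟩ := List.any_eq_true.1 hany
        refine hm ?_
        have : p.1 ∈ (fstM n length reverse l).map Prod.fst := List.mem_map_of_mem hp
        rw [fstM_keys] at this
        exact (beq_iff_eq.1 hfst) ▸ (PySem.Set.mem_ofList _ _).1 this
      have hstep : stepA' n length reverse st x =
          (st.1.insert x.2 (pvMeta n length reverse x.1), st.2) := by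
        simp only [stepA', hcont, hdc, Bool.false_and, Bool.false_eq_true, if_false,
          Bool.not_false, Bool.true_and, if_true]
      rw [hfold, hstep, hstepM, if_neg (by rw [hany]; simp)]
      refine ⟨?_, ?_, ?_⟩
      · rw [PySem.Dict.items_insert_of_not_contains _ _ hcont, hitems]
      · exact PySem.Dict.nodup_keys_insert _ _ _ hnd
      · intro w
        rw [hcount]
        by_cases hw : w = x.2
        · subst hw
          have hc0 : (l.map Prod.snd).count x.2 = 0 := List.count_eq_zero.2 hm
          rw [if_pos rfl, hc0]
          exact ⟨fun h => absurd h hd, fun h => by omega⟩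
        · simp only [if_neg hw, Nat.add_zero]
          exact hdups w

-- A's final pop loop is a filter on the items list
lemma popFold_items {ν : Type} :
    ∀ (dups : List String) (d : PySem.Dict String ν),
    (dups.foldl (fun d k => if d.contains k then d.erase k else d) d).items =
      d.items.filter (fun p => !(dups.contains p.1)) := by
  intro dups
  induction dups with
  | nil => intro d; simp
  | cons k rest ih =>
    intro d
    have hstep : (if d.contains k then d.erase k else d).items = d.items.filter (fun p => !(p.1 == k)) := by
      by_cases hc : d.contains k = true
      · rw [if_pos hc]; rfl
      · rw [if_neg hc]
        have : ∀ p ∈ d.items, (!(p.1 == k)) = true := by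
          intro p hp
          have hpk : p.1 ≠ k := by
            intro he
            exact hc ((PySem.Dict.contains_iff_mem_keys _ _).2 (he ▸ PySem.Dict.mem_keys_of_mem_items _ hp))
          simp [hpk]
        exact (List.filter_eq_self.2 this).symm
    rw [List.foldl_cons, ih, hstep, List.filter_filter]
    refine List.filter_congr (fun p _ => ?_)
    simp only [List.contains_cons, Bool.not_or, Bool.and_comm]

-- characterisation of B's final fold
lemma B_char (n length : Int) (reverse : Bool) (q : String → Bool) (ws : List (Int × String))
    (hq : ∀ w, q w = false → ((ws.map Prod.snd).count w ≤ 1)) :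
    ∀ l : List (Int × String), l.Sublist ws →
      (l.foldl (stepB' n length reverse q) PySem.Dict.empty).items =
        (fstM n length reverse l).filter (fun p => !(q p.1)) := by
  intro l
  induction l using List.reverseRecOn with
  | nil => intro _; rfl
  | append_singleton l x ih =>
    intro hsub
    have hsubl : l.Sublist ws := (List.sublist_append_left l [x]).trans hsub
    have hitems := ih hsubl
    have hfold : (l ++ [x]).foldl (stepB' n length reverse q) PySem.Dict.empty =
        stepB' n length reverse q (l.foldl (stepB' n length reverse q) PySem.Dict.empty) x := by
      rw [List.foldl_append, List.foldl_cons, List.foldl_nil]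
    have hstepM : fstM n length reverse (l ++ [x]) =
        (if (fstM n length reverse l).any (fun p => p.1 == x.2) then fstM n length reverse l
         else fstM n length reverse l ++ [(x.2, pvMeta n length reverse x.1)]) := by
      simp only [fstM, List.foldl_append, List.foldl_cons, List.foldl_nil]
    by_cases hqx : q x.2 = true
    · have hstep : stepB' n length reverse q
          (l.foldl (stepB' n length reverse q) PySem.Dict.empty) x =
          l.foldl (stepB' n length reverse q) PySem.Dict.empty := by
        simp only [stepB', hqx, if_true]
      rw [hfold, hstep, hitems, hstepM]
      by_cases hany : (fstM n length reverse l).any (fun p => p.1 == x.2) = true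
      · rw [if_pos hany]
      · rw [if_neg hany, List.filter_append]
        simp [hqx]
    · have hqx' : q x.2 = false := by simpa using hqx
      have hcle : ((l ++ [x]).map Prod.snd).count x.2 ≤ (ws.map Prod.snd).count x.2 :=
        (List.Sublist.map Prod.snd hsub).count_le x.2
      have hc1 : 1 ≤ ((l ++ [x]).map Prod.snd).count x.2 :=
        List.one_le_count_iff.2 (by simp)
      have hc0 : (l.map Prod.snd).count x.2 = 0 := by
        have := hq x.2 hqx'
        have hsplit : ((l ++ [x]).map Prod.snd).count x.2 =
            (l.map Prod.snd).count x.2 + 1 := by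
          rw [List.map_append, List.count_append]
          simp
        omega
      have hm : x.2 ∉ l.map Prod.snd := List.count_eq_zero.1 hc0
      have hany : (fstM n length reverse l).any (fun p => p.1 == x.2) = false := by
        rw [Bool.eq_false_iff]
        intro hany
        obtain ⟨p, hp, hfst⟩ := List.any_eq_true.1 hany
        refine hm ?_
        have : p.1 ∈ (fstM n length reverse l).map Prod.fst := List.mem_map_of_mem hp
        rw [fstM_keys] at this
        exact (beq_iff_eq.1 hfst) ▸ (PySem.Set.mem_ofList _ _).1 this
      have hcont : (l.foldl (stepB' n length reverse q) PySem.Dict.empty).contains x.2 = false := by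
        rw [Bool.eq_false_iff]
        intro hc
        have hk := (PySem.Dict.contains_iff_mem_keys _ _).1 hc
        have : x.2 ∈ ((fstM n length reverse l).filter (fun p => !(q p.1))).map Prod.fst := by
          have hkeq : (l.foldl (stepB' n length reverse q) PySem.Dict.empty).keys =
              ((fstM n length reverse l).filter (fun p => !(q p.1))).map Prod.fst := by
            show (l.foldl (stepB' n length reverse q) PySem.Dict.empty).items.map Prod.fst = _
            rw [hitems]
          rw [hkeq] at hk
          exact hk
        obtain ⟨p, hp, hfst⟩ := List.mem_map.1 this
        have hp' : p ∈ fstM n length reverse l := List.mem_of_mem_filter hp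
        refine hm ?_
        have : p.1 ∈ (fstM n length reverse l).map Prod.fst := List.mem_map_of_mem hp'
        rw [fstM_keys] at this
        exact hfst ▸ (PySem.Set.mem_ofList _ _).1 this
      have hstep : stepB' n length reverse q
          (l.foldl (stepB' n length reverse q) PySem.Dict.empty) x =
          (l.foldl (stepB' n length reverse q) PySem.Dict.empty).insert x.2
            (pvMeta n length reverse x.1) := by
        simp only [stepB', hqx', Bool.false_eq_true, if_false]
      rw [hfold, hstep, PySem.Dict.items_insert_of_not_contains _ _ hcont, hitems, hstepM,
        if_neg (by rw [hany]; simp), List.filter_append]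
      simp [hqx']

-- an adjacent equal pair in a ≤-sorted list ↔ an element of count ≥ 2
lemma adj_of_two_le_count (w : String) :
    ∀ l : List String, l.Pairwise (· ≤ ·) → 2 ≤ l.count w →
      ∃ j : Nat, ∃ h : j + 1 < l.length, l[j] = w ∧ l[j+1] = w := by
  intro l
  induction l with
  | nil => intro _ hc; simp at hc
  | cons a t ih =>
    intro hp hc
    obtain ⟨ha, hpt⟩ := List.pairwise_cons.1 hp
    by_cases haw : a = w
    · subst haw
      have hct : 1 ≤ t.count a := by
        rw [List.count_cons] at hc
        simp only [beq_self_eq_true, if_true] at hc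
        omega
      have hwmem : a ∈ t := List.one_le_count_iff.1 hct
      cases t with
      | nil => simp at hwmem
      | cons b t' =>
        have hab : a ≤ b := ha b (by simp)
        have hba : b ≤ a := by
          rcases List.mem_cons.1 hwmem with h | h
          · exact le_of_eq h.symm
          · exact (List.pairwise_cons.1 hpt).1 a h
        have hbeq : b = a := le_antisymm hba hab
        exact ⟨0, by simp, rfl, by simpa using hbeq⟩
    · have hct : 2 ≤ t.count w := by
        rw [List.count_cons] at hc
        have : (a == w) = false := by simp [haw]
        rw [this] at hc
        simp only [Bool.false_eq_true, if_false] at hc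
        omega
      obtain ⟨j, hj, h1, h2⟩ := ih hpt hct
      exact ⟨j + 1, by simpa using Nat.succ_lt_succ hj, by simpa using h1, by simpa using h2⟩

lemma two_le_count_of_adj (w : String) (l : List String) (j : Nat) (h : j + 1 < l.length)
    (h1 : l[j] = w) (h2 : l[j+1] = w) : 2 ≤ l.count w := by
  have hj : j < l.length := by omega
  have e1 : l.drop j = l[j] :: l.drop (j + 1) := List.drop_eq_getElem_cons hj
  have e2 : l.drop (j + 1) = l[j+1] :: l.drop (j + 2) := List.drop_eq_getElem_cons h
  have hdc : 2 ≤ (l.drop j).count w := by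
    rw [e1, e2, h1, h2]
    simp
  exact le_trans hdc ((List.drop_sublist j l).count_le w)

-- the duplicated set holds exactly the primers occurring at least twice
lemma dup_mem (seen : List String) (w : String) :
    (w ∈ ((PySem.List.pyRange 1 (Int.ofNat (PySem.List.sorted seen (fun x => x) false).length) 1).filterMap (fun j =>
      match PySem.List.pyGet? (PySem.List.sorted seen (fun x => x) false) (j - 1),
            PySem.List.pyGet? (PySem.List.sorted seen (fun x => x) false) j with
      | some a, some b => if a == b then some b else none
      | _, _ => none))) ↔ 2 ≤ seen.count w := by
  set ord := PySem.List.sorted seen (fun x => x) false with hord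
  have hperm : ord.Perm seen := PySem.List.sorted_perm _ _ _
  have hcnt : ord.count w = seen.count w := hperm.count_eq w
  constructor
  · intro hmem
    obtain ⟨j, hj, hf⟩ := List.mem_filterMap.1 hmem
    obtain ⟨hj1, hj2⟩ := (PySem.List.mem_pyRange_one).1 hj
    have hjn : ((j.toNat : Nat) : Int) = j := Int.toNat_of_nonneg (by omega)
    cases hga : PySem.List.pyGet? ord (j - 1) with
    | none => rw [hga] at hf; cases hgb : PySem.List.pyGet? ord j <;> rw [hgb] at hf <;> simp at hf
    | some a =>
      cases hgb : PySem.List.pyGet? ord j with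
      | none => rw [hga, hgb] at hf; simp at hf
      | some b =>
        rw [hga, hgb] at hf
        dsimp only at hf
        by_cases hab : (a == b) = true
        · rw [if_pos hab] at hf
          have hbw : b = w := by simpa using hf
          have hab' : a = b := beq_iff_eq.1 hab
          -- turn the two lookups into getElem facts
          have hga' : ord[(j.toNat - 1 : Nat)]? = some a := by
            have : ((j.toNat - 1 : Nat) : Int) = j - 1 := by omega
            rw [← this, PySem.List.pyGet?_natCast] at hga
            exact hga
          have hgb' : ord[(j.toNat : Nat)]? = some b := by
            rw [← hjn, PySem.List.pyGet?_natCast] at hgb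
            exact hgb
          obtain ⟨hlt1, he1⟩ := List.getElem?_eq_some_iff.1 hga'
          obtain ⟨hlt2, he2⟩ := List.getElem?_eq_some_iff.1 hgb'
          have hsucc : (j.toNat - 1) + 1 = j.toNat := by omega
          rw [← hcnt]
          refine two_le_count_of_adj w ord (j.toNat - 1) (by omega) ?_ ?_
          · rw [he1, hab', hbw]
          · simp only [hsucc]
            rw [he2, hbw]
        · rw [if_neg hab] at hf; simp at hf
  · intro hc
    obtain ⟨j, hjlt, h1, h2⟩ := adj_of_two_le_count w ord
      (by simpa using PySem.List.sorted_pairwise seen (fun x => x)) (by omega)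
    refine List.mem_filterMap.2 ⟨((j + 1 : Nat) : Int), ?_, ?_⟩
    · refine (PySem.List.mem_pyRange_one).2 ⟨by omega, ?_⟩
      simp only [Int.ofNat_eq_natCast]
      exact_mod_cast hjlt
    · have hga : PySem.List.pyGet? ord (((j + 1 : Nat) : Int) - 1) = some w := by
        have h' : (((j + 1 : Nat) : Int) - 1) = ((j : Nat) : Int) := by push_cast; ring
        rw [h', PySem.List.pyGet?_natCast, List.getElem?_eq_getElem (by omega), h1]
      have hgb : PySem.List.pyGet? ord ((j + 1 : Nat) : Int) = some w := by
        rw [PySem.List.pyGet?_natCast, List.getElem?_eq_getElem hjlt, h2]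
      rw [hga, hgb]
      dsimp only
      simp

-- ===== VERDICT (by name: the statement is the Claim_ definition above) =====
set_option maxHeartbeats 400000 in
theorem trie_primers_spec : Claim_equal_trie_primers := by
  intro sequence length reverse _
  unfold Spec_trie_primers trie_primers trie_primers_alt
  simp only []
  refine Eq.symm ?_
  -- shared data
  have hws : ((PySem.List.pyRange 0 (PySem.Str.len sequence + 1) 1).foldl
      (fun acc i =>
        let w := PySem.Str.slice sequence (some i) (some (i + length))
        if PySem.Str.len w == length then acc ++ [(i, w)] else acc) []) =
      (((PySem.List.pyRange 0 (PySem.Str.len sequence + 1) 1).filter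
          (fun i => PySem.Str.len (PySem.Str.slice sequence (some i) (some (i + length))) == length)).map
        (fun i => (i, PySem.Str.slice sequence (some i) (some (i + length))))) := by
    rw [PySem.List.foldl_append_if
      (p := fun i => PySem.Str.len (PySem.Str.slice sequence (some i) (some (i + length))) == length)
      (f := fun i => (i, PySem.Str.slice sequence (some i) (some (i + length))))]
    simp
  set ws := (((PySem.List.pyRange 0 (PySem.Str.len sequence + 1) 1).filter
      (fun i => PySem.Str.len (PySem.Str.slice sequence (some i) (some (i + length))) == length)).map
    (fun i => (i, PySem.Str.slice sequence (some i) (some (i + length))))) with hwsdef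
  -- A's range loop is stepA' over ws
  have hA : (PySem.List.pyRange 0 (PySem.Str.len sequence + 1) 1).foldl
      (trieStepA sequence length reverse) (PySem.Dict.empty, []) =
      ws.foldl (stepA' (PySem.Str.len sequence) length reverse) (PySem.Dict.empty, []) :=
    fold_over_windows _ _ _ _ (A_step_eq sequence length reverse) _ _
  obtain ⟨hitems, hnd, hdups⟩ := A_char (PySem.Str.len sequence) length reverse ws
  -- the duplicated-set membership test decides "count ≥ 2"
  have hq : ∀ v : String,
      (PySem.Set.ofList
        ((PySem.List.pyRange 1 (Int.ofNat (PySem.List.sorted (ws.map Prod.snd) (fun x => x) false).length) 1).filterMap (fun j =>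
          match PySem.List.pyGet? (PySem.List.sorted (ws.map Prod.snd) (fun x => x) false) (j - 1),
                PySem.List.pyGet? (PySem.List.sorted (ws.map Prod.snd) (fun x => x) false) j with
          | some a, some b => if a == b then some b else none
          | _, _ => none))).contains v = true ↔ 2 ≤ (ws.map Prod.snd).count v := by
    intro v
    rw [PySem.Set.contains_iff, PySem.Set.mem_ofList]
    exact dup_mem (ws.map Prod.snd) v
  rw [hws, hA, popFold_items]
  rw [hitems]
  -- B's final loop is stepB' over ws
  have hstepB : (fun (d : PySem.Dict String (List (String × Int))) (p : Int × String) =>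
      if (PySem.Set.ofList
        ((PySem.List.pyRange 1 (Int.ofNat (PySem.List.sorted (ws.map Prod.snd) (fun x => x) false).length) 1).filterMap (fun j =>
          match PySem.List.pyGet? (PySem.List.sorted (ws.map Prod.snd) (fun x => x) false) (j - 1),
                PySem.List.pyGet? (PySem.List.sorted (ws.map Prod.snd) (fun x => x) false) j with
          | some a, some b => if a == b then some b else none
          | _, _ => none))).contains p.2 then d
      else
        let start : Int := if reverse then PySem.Str.len sequence - p.1 else p.1 + 1
        let stop : Int := if reverse then start + 1 - length else p.1 + length
        d.insert p.2 [("length", length), ("start", start), ("stop", stop)]) =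
      stepB' (PySem.Str.len sequence) length reverse
        (fun v => (PySem.Set.ofList
          ((PySem.List.pyRange 1 (Int.ofNat (PySem.List.sorted (ws.map Prod.snd) (fun x => x) false).length) 1).filterMap (fun j =>
            match PySem.List.pyGet? (PySem.List.sorted (ws.map Prod.snd) (fun x => x) false) (j - 1),
                  PySem.List.pyGet? (PySem.List.sorted (ws.map Prod.snd) (fun x => x) false) j with
            | some a, some b => if a == b then some b else none
            | _, _ => none))).contains v) := by
    funext d p
    simp only [stepB', pvMeta]
  rw [hstepB, B_char (PySem.Str.len sequence) length reverse _ ws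
    (fun v hv => by
      have h2 : ¬ 2 ≤ (ws.map Prod.snd).count v := fun h => by
        have hx := (hq v).2 h
        rw [hv] at hx
        exact absurd hx (by simp)
      omega) ws (List.Sublist.refl ws)]
  set DA := ((ws.foldl (stepA' (PySem.Str.len sequence) length reverse) (PySem.Dict.empty, ([] : List String))).2) with hDA
  set Q := PySem.Set.ofList
        ((PySem.List.pyRange 1 (Int.ofNat (PySem.List.sorted (ws.map Prod.snd) (fun x => x) false).length) 1).filterMap (fun j =>
          match PySem.List.pyGet? (PySem.List.sorted (ws.map Prod.snd) (fun x => x) false) (j - 1),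
                PySem.List.pyGet? (PySem.List.sorted (ws.map Prod.snd) (fun x => x) false) j with
          | some a, some b => if a == b then some b else none
          | _, _ => none)) with hQ
  have hfun : ∀ v : String, Q.contains v = DA.contains v := by
    intro v
    rw [Bool.eq_iff_iff, hq v]
    constructor
    · intro h
      simpa using (hdups v).2 h
    · intro h
      exact (hdups v).1 (by simpa using h)
  simp only [hfun]
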